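-- pv_equiv track=rewrite | github.com/HodzaArmen/P1 | ZemljevidOvir/ZemljevidOvir.py | izboljsave
-- ===== SOURCE A (Python) =====
-- def pretvori_vrstico(vrstica):
--     ovire = []
--     trenutnaOvira = None
--     index = 1
--     for znak in vrstica:
--         if znak == "#":
--             if trenutnaOvira is None:
--                 trenutnaOvira = (index, index)
--             else:
--                 trenutnaOvira = (trenutnaOvira[0], index)
--         else:
--             if trenutnaOvira is not None:
--                 ovire.append(trenutnaOvira)
--                 trenutnaOvira = None
--         index += 1
--     if trenutnaOvira is not None:
--         ovire.append(trenutnaOvira)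
--     return ovire
--
-- def pretvori_zemljevid(vrstice):
--     ovire = []
--     y = 1
--     for vrstica in vrstice:
--         for x0, x1 in pretvori_vrstico(vrstica):
--             ovire.append((x0, x1, y))
--         y += 1
--     return sorted(ovire, key=lambda x: (x[2], x[0])) #sortirano po vrsticah in stolpcih
--
-- def izboljsave(prej, potem):
--     pretvoriPrej = pretvori_zemljevid(prej) #pretvorimo v seznam trojk
--     pretvoriPotem = pretvori_zemljevid(potem) #pretvorimo v seznam trojk
--     noveOvire = []
--     for nova_ovira in pretvoriPotem: #zanka skozi sezname trojk potem
--         if nova_ovira not in pretvoriPrej: #če sezname trojk potem ni v seznamih trojk prej, potem je to nova ovira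
--             noveOvire.append(nova_ovira)
--     return sorted(noveOvire, key=lambda x: (x[2], x[0])) #sortirano po vrsticah in stolpcih
-- ===== SOURCE B (Python) =====
-- def izboljsave(prej, potem):
--     def runs(line):
--         pos = {i for i, c in enumerate(line, 1) if c == "#"}
--         starts = sorted(p for p in pos if p - 1 not in pos)
--         ends = sorted(p for p in pos if p + 1 not in pos)
--         return list(zip(starts, ends))
--
--     nove = []
--     for y, line in enumerate(potem, 1):
--         stare = runs(prej[y - 1]) if y <= len(prej) else []
--         nove.extend((a, b, y) for a, b in runs(line) if (a, b) not in stare)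
--     return nove
-- ===== Notes on version B (the rewrite author's own statement) =====
-- stated objective: alternative
-- what changed: Obstacle runs are found by boundary detection on the set of '#' positions of each line (a start is a position whose left neighbour is not in the set, an end one whose right neighbour is not; the two sorted boundary lists are zipped), replacing A's char-by-char Option-state machine, and new runs are determined row by row against the matching line of 'prej' instead of A's global build-two-triple-lists, membership-filter and re-sort pipeline.
import Mathlib
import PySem

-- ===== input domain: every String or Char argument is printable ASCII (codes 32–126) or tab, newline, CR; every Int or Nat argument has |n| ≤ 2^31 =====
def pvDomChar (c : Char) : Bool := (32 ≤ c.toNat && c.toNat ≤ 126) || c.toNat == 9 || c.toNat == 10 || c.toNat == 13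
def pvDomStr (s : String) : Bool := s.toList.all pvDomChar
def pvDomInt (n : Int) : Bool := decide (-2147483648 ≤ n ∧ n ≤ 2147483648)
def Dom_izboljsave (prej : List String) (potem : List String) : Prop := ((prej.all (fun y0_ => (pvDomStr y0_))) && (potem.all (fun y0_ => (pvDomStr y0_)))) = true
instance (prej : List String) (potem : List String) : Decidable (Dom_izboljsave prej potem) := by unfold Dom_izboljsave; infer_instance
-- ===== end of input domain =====

-- B finds each line's obstacle runs by boundary detection over the SET of '#' positions
-- (a start is a '#' position whose left neighbour is not '#', an end one whose right
-- neighbour is not; zip the two sorted boundary lists), and diffs ROW BY ROW against the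
-- corresponding line of 'prej' instead of building and filtering two global sorted triple
-- lists.  Objective: alternative decomposition; identical return values.

-- ===== PORT A =====
-- loop body of pretvori_vrstico: state = (ovire, trenutnaOvira, index)
def aKorak (st : List (Int × Int) × Option (Int × Int) × Int) (znak : Char) :
    List (Int × Int) × Option (Int × Int) × Int :=
  if znak = '#' then
    match st.2.1 with
    | none => (st.1, some (st.2.2, st.2.2), st.2.2 + 1)
    | some t => (st.1, some (t.1, st.2.2), st.2.2 + 1)
  else
    match st.2.1 with
    | some t => (st.1 ++ [t], none, st.2.2 + 1)
    | none => (st.1, none, st.2.2 + 1)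

def pretvoriVrstico (vrstica : String) : List (Int × Int) :=
  let st := vrstica.toList.foldl aKorak ([], none, 1)
  match st.2.1 with
  | some t => st.1 ++ [t]
  | none => st.1

def pretvoriZemljevid (vrstice : List String) : List (Int × Int × Int) :=
  let st := vrstice.foldl
    (fun (st : List (Int × Int × Int) × Int) vrstica =>
      ((pretvoriVrstico vrstica).foldl (fun acc p => acc ++ [(p.1, p.2, st.2)]) st.1, st.2 + 1))
    ([], 1)
  PySem.List.sorted2 st.1 (fun x => x.2.2) (fun x => x.1)

def izboljsave (prej : List String) (potem : List String) : List (Int × Int × Int) :=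
  let pretvoriPrej := pretvoriZemljevid prej
  let pretvoriPotem := pretvoriZemljevid potem
  let noveOvire := pretvoriPotem.foldl
    (fun acc nova_ovira => if nova_ovira ∈ pretvoriPrej then acc else acc ++ [nova_ovira]) []
  PySem.List.sorted2 noveOvire (fun x => x.2.2) (fun x => x.1)

-- ===== PORT B =====
-- pos = {i for i, c in enumerate(line, 1) if c == "#"}
def bPos (line : String) : PySem.Set Int :=
  PySem.Set.ofList (((PySem.List.enumerate line.toList 1).filter (fun p => p.2 == '#')).map (fun p => p.1))

-- starts/ends are sorted() of set comprehensions (identity key, so set order is immaterial)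
def bRuns (line : String) : List (Int × Int) :=
  let pos := bPos line
  let starts := PySem.List.sorted (pos.filter (fun p => !(PySem.Set.contains pos (p - 1)))) (fun x => x) false
  let ends := PySem.List.sorted (pos.filter (fun p => !(PySem.Set.contains pos (p + 1)))) (fun x => x) false
  starts.zip ends

-- stare = runs(prej[y - 1]) if y <= len(prej) else []
def bStare (prej : List String) (y : Int) : List (Int × Int) :=
  if y ≤ (prej.length : Int) then bRuns ((PySem.List.pyGet? prej (y - 1)).getD "") else []

def izboljsave_alt (prej : List String) (potem : List String) : List (Int × Int × Int) :=
  (PySem.List.enumerate potem 1).flatMap (fun py =>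
    ((bRuns py.2).filter (fun r => !((bStare prej py.1).contains r))).map (fun r => (r.1, r.2, py.1)))

-- ===== PRECONDITION & SPEC =====
def Spec_izboljsave (prej : List String) (potem : List String) (out : List (Int × Int × Int)) : Prop := out = izboljsave_alt prej potem
instance (prej : List String) (potem : List String) (out : List (Int × Int × Int)) : Decidable (Spec_izboljsave prej potem out) := by unfold Spec_izboljsave; infer_instance

-- ===== CLAIM (what is proved, stated in full; the proofs are below) =====
def Claim_equal_izboljsave : Prop := ∀ (prej : List String) (potem : List String), Dom_izboljsave prej potem → Spec_izboljsave prej potem (izboljsave prej potem)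

-- ===== LEMMAS AND PROOFS =====

-- A's character state machine, written functionally (proof-side intermediate)
def RL : List Char → Int → Option (Int × Int) → List (Int × Int)
  | [], _, none => []
  | [], _, some t => [t]
  | c :: r, i, st =>
    if c = '#' then RL r (i + 1) (some (match st with | none => (i, i) | some t => (t.1, i)))
    else match st with
      | none => RL r (i + 1) none
      | some t => t :: RL r (i + 1) none

-- 1-based positions of '#'
def posL : List Char → Int → List Int
  | [], _ => []
  | c :: r, i => if c = '#' then i :: posL r (i + 1) else posL r (i + 1)

def hHead : List Char → Bool
  | [] => false
  | d :: _ => d = '#'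

-- run starts (prev = whether position i-1 holds '#') and run ends
def Rs : List Char → Int → Bool → List Int
  | [], _, _ => []
  | c :: r, i, prev =>
    if c = '#' then (if prev then Rs r (i + 1) true else i :: Rs r (i + 1) true)
    else Rs r (i + 1) false

def Re : List Char → Int → List Int
  | [], _ => []
  | c :: r, i =>
    if c = '#' then (if hHead r then Re r (i + 1) else i :: Re r (i + 1))
    else Re r (i + 1)

theorem posL_eq_port (cs : List Char) (i : Int) :
    ((PySem.List.enumerate cs i).filter (fun p => p.2 == '#')).map (fun p => p.1) = posL cs i := by
  induction cs generalizing i with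
  | nil => simp [posL, PySem.List.enumerate]
  | cons c r ih =>
    rw [PySem.List.enumerate_cons, posL]
    by_cases hc : c = '#' <;> simp [hc, ih]

theorem posL_lb (cs : List Char) (i : Int) : ∀ p ∈ posL cs i, i ≤ p := by
  induction cs generalizing i with
  | nil => simp [posL]
  | cons c r ih =>
    intro p hp
    rw [posL] at hp
    split at hp
    · rcases List.mem_cons.mp hp with h | h
      · omega
      · have := ih (i + 1) p h; omega
    · have := ih (i + 1) p hp; omega

theorem posL_pairwise (cs : List Char) (i : Int) : (posL cs i).Pairwise (· < ·) := by
  induction cs generalizing i with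
  | nil => simp [posL]
  | cons c r ih =>
    rw [posL]
    split
    · exact List.Pairwise.cons (fun p hp => by have := posL_lb r (i + 1) p hp; omega) (ih (i + 1))
    · exact ih (i + 1)

theorem posL_nodup (cs : List Char) (i : Int) : (posL cs i).Nodup :=
  (posL_pairwise cs i).imp (fun h => ne_of_lt h)

theorem mem_posL_head (cs : List Char) (i : Int) : i ∈ posL cs i ↔ hHead cs = true := by
  cases cs with
  | nil => simp [posL, hHead]
  | cons c r =>
    rw [posL, hHead]
    split
    · simp_all
    · constructor
      · intro h; have := posL_lb r (i + 1) i h; omega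
      · simp_all

theorem bPos_eq (line : String) : bPos line = posL line.toList 1 := by
  rw [bPos, posL_eq_port]
  exact PySem.Set.ofList_eq_self_of_nodup _ (posL_nodup line.toList 1)

-- the start filter over the whole-line position set is Rs
theorem filter_starts (cs : List Char) : ∀ (i : Int) (prev : Bool) (S : List Int),
    (∀ q, i ≤ q → (q ∈ S ↔ q ∈ posL cs i)) → ((i - 1 ∈ S) ↔ prev = true) →
    (posL cs i).filter (fun p => !(decide ((p - 1) ∈ S))) = Rs cs i prev := by
  induction cs with
  | nil => intro i prev S _ _; simp [posL, Rs]
  | cons c r ih =>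
    intro i prev S h1 h2
    have hS1 : ∀ q, i + 1 ≤ q → (q ∈ S ↔ q ∈ posL r (i + 1)) := by
      intro q hq
      rw [h1 q (by omega), posL]
      split
      · rw [List.mem_cons]
        constructor
        · rintro (h | h); · omega
          · exact h
        · exact Or.inr
      · exact Iff.rfl
    by_cases hc : c = '#'
    · have hS2 : (i ∈ S) := by
        rw [h1 i (by omega), posL, if_pos hc]; simp
      have hb : decide ((i - 1) ∈ S) = prev := by
        rcases prev with _ | _ <;> simp [h2]
      have hrec := ih (i + 1) true S hS1
        (by rw [show i + 1 - (1 : Int) = i by omega]; simpa using hS2)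
      rw [posL, if_pos hc, Rs, if_pos hc, List.filter_cons]
      rcases prev with _ | _ <;> simp [hb, hrec]
    · have hS2 : ¬ (i ∈ S) := by
        rw [h1 i (by omega), posL, if_neg hc]
        intro h
        have := posL_lb r (i + 1) i h; omega
      rw [posL, if_neg hc, Rs, if_neg hc]
      exact ih (i + 1) false S hS1
        (by rw [show i + 1 - (1 : Int) = i by omega]; simpa using hS2)

-- the end filter over the whole-line position set is Re
theorem filter_ends (cs : List Char) : ∀ (i : Int) (S : List Int),
    (∀ q, i ≤ q → (q ∈ S ↔ q ∈ posL cs i)) →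
    (posL cs i).filter (fun p => !(decide ((p + 1) ∈ S))) = Re cs i := by
  induction cs with
  | nil => intro i S _; simp [posL, Re]
  | cons c r ih =>
    intro i S h1
    have hS1 : ∀ q, i + 1 ≤ q → (q ∈ S ↔ q ∈ posL r (i + 1)) := by
      intro q hq
      rw [h1 q (by omega), posL]
      split
      · rw [List.mem_cons]
        constructor
        · rintro (h | h); · omega
          · exact h
        · exact Or.inr
      · exact Iff.rfl
    by_cases hc : c = '#'
    · have hnext : (i + 1 ∈ S) ↔ hHead r = true := by
        rw [hS1 (i + 1) (by omega), mem_posL_head]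
      have hb : decide ((i + 1) ∈ S) = hHead r := by
        rcases h : hHead r <;> simp [hnext, h]
      have hrec := ih (i + 1) S hS1
      rw [posL, if_pos hc, Re, if_pos hc, List.filter_cons]
      rcases h : hHead r <;> simp_all
    · rw [posL, if_neg hc, Re, if_neg hc]
      exact ih (i + 1) S hS1

-- starts of A's machine are Rs
theorem RL_map_fst (cs : List Char) : ∀ (i : Int),
    ((RL cs i none).map (fun t => t.1) = Rs cs i false) ∧
    (∀ a j, (RL cs i (some (a, j))).map (fun t => t.1) = a :: Rs cs i true) := by
  induction cs with
  | nil => intro i; exact ⟨by simp [RL, Rs], fun a j => by simp [RL, Rs]⟩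
  | cons c r ih =>
    intro i
    by_cases hc : c = '#'
    · constructor
      · rw [RL, if_pos hc, Rs, if_pos hc, ((ih (i + 1)).2 i i)]
        simp
      · intro a j
        rw [RL, if_pos hc, Rs, if_pos hc, ((ih (i + 1)).2 a i)]
        simp
    · constructor
      · rw [RL, if_neg hc, Rs, if_neg hc]
        exact (ih (i + 1)).1
      · intro a j
        rw [RL, if_neg hc, Rs, if_neg hc, List.map_cons, (ih (i + 1)).1]

-- ends of A's machine are Re
theorem RL_map_snd (cs : List Char) : ∀ (i : Int),
    ((RL cs i none).map (fun t => t.2) = Re cs i) ∧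
    (∀ a, (RL cs i (some (a, i - 1))).map (fun t => t.2) =
      if hHead cs then Re cs i else (i - 1) :: Re cs i) := by
  induction cs with
  | nil => intro i; exact ⟨by simp [RL, Re], fun a => by simp [RL, Re, hHead]⟩
  | cons c r ih =>
    intro i
    by_cases hc : c = '#'
    · constructor
      · rw [RL, if_pos hc, Re, if_pos hc]
        have := (ih (i + 1)).2 i
        simpa using this
      · intro a
        rw [RL, if_pos hc]
        have := (ih (i + 1)).2 a
        simp only [show i + 1 - 1 = i by omega] at this
        rw [this, hHead, Re, if_pos hc]
        simp [hc]
    · constructor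
      · rw [RL, if_neg hc, Re, if_neg hc]
        exact (ih (i + 1)).1
      · intro a
        rw [RL, if_neg hc, Re, if_neg hc, List.map_cons, (ih (i + 1)).1, hHead]
        simp [hc]

theorem Rs_lb (cs : List Char) : ∀ (i : Int) (b : Bool), ∀ p ∈ Rs cs i b, i ≤ p := by
  induction cs with
  | nil => intro i b p hp; simp [Rs] at hp
  | cons c r ih =>
    intro i b p hp
    rw [Rs] at hp
    split at hp
    · split at hp
      · have := ih (i + 1) true p hp; omega
      · rcases List.mem_cons.mp hp with h | h
        · omega
        · have := ih (i + 1) true p h; omega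
    · have := ih (i + 1) false p hp; omega

theorem Rs_pairwise (cs : List Char) : ∀ (i : Int) (b : Bool), (Rs cs i b).Pairwise (· < ·) := by
  induction cs with
  | nil => intro i b; simp [Rs]
  | cons c r ih =>
    intro i b
    rw [Rs]
    split
    · split
      · exact ih (i + 1) true
      · exact List.Pairwise.cons (fun p hp => by have := Rs_lb r (i + 1) true p hp; omega)
          (ih (i + 1) true)
    · exact ih (i + 1) false

theorem Re_lb (cs : List Char) : ∀ (i : Int), ∀ p ∈ Re cs i, i ≤ p := by
  induction cs with
  | nil => intro i p hp; simp [Re] at hp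
  | cons c r ih =>
    intro i p hp
    rw [Re] at hp
    split at hp
    · split at hp
      · have := ih (i + 1) p hp; omega
      · rcases List.mem_cons.mp hp with h | h
        · omega
        · have := ih (i + 1) p h; omega
    · have := ih (i + 1) p hp; omega

theorem Re_pairwise (cs : List Char) : ∀ (i : Int), (Re cs i).Pairwise (· < ·) := by
  induction cs with
  | nil => intro i; simp [Re]
  | cons c r ih =>
    intro i
    rw [Re]
    split
    · split
      · exact ih (i + 1)
      · exact List.Pairwise.cons (fun p hp => by have := Re_lb r (i + 1) p hp; omega) (ih (i + 1))
    · exact ih (i + 1)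

-- A's foldl over the characters computes RL
theorem aFold_RL (cs : List Char) : ∀ (acc : List (Int × Int)) (st : Option (Int × Int)) (i : Int),
    (match (cs.foldl aKorak (acc, st, i)).2.1 with
      | some t => (cs.foldl aKorak (acc, st, i)).1 ++ [t]
      | none => (cs.foldl aKorak (acc, st, i)).1) = acc ++ RL cs i st := by
  induction cs with
  | nil =>
    intro acc st i
    rcases st with _ | t <;> simp [RL]
  | cons c r ih =>
    intro acc st i
    rw [List.foldl_cons]
    by_cases hc : c = '#'
    · rcases st with _ | t
      · rw [show aKorak (acc, none, i) c = (acc, some (i, i), i + 1) by simp [aKorak, hc]]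
        rw [ih acc (some (i, i)) (i + 1), RL, if_pos hc]
      · rw [show aKorak (acc, some t, i) c = (acc, some (t.1, i), i + 1) by simp [aKorak, hc]]
        rw [ih acc (some (t.1, i)) (i + 1), RL, if_pos hc]
    · rcases st with _ | t
      · rw [show aKorak (acc, none, i) c = (acc, none, i + 1) by simp [aKorak, hc]]
        rw [ih acc none (i + 1), RL, if_neg hc]
      · rw [show aKorak (acc, some t, i) c = (acc ++ [t], none, i + 1) by simp [aKorak, hc]]
        rw [ih (acc ++ [t]) none (i + 1), RL, if_neg hc]
        simp

theorem pretvoriVrstico_RL (s : String) : pretvoriVrstico s = RL s.toList 1 none := by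
  have := aFold_RL s.toList [] none 1
  simpa [pretvoriVrstico] using this

-- B's boundary-detection run extraction computes A's run list
theorem bRuns_eq (line : String) : bRuns line = pretvoriVrstico line := by
  rw [bRuns, pretvoriVrstico_RL, bPos_eq]
  have hfull : ∀ q : Int, (1 : Int) ≤ q → (q ∈ posL line.toList 1 ↔ q ∈ posL line.toList 1) :=
    fun _ _ => Iff.rfl
  have h0 : ((1 : Int) - 1 ∈ posL line.toList 1) ↔ False := by
    constructor
    · intro h; have := posL_lb line.toList 1 0 h; omega
    · exact False.elim
  have hs := filter_starts line.toList 1 false (posL line.toList 1) hfull (by simpa using h0)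
  have he := filter_ends line.toList 1 (posL line.toList 1) hfull
  have hcs : ∀ x : Int, PySem.Set.contains (posL line.toList 1) x = decide (x ∈ posL line.toList 1) := by
    intro x
    simp [PySem.Set.contains_eq_listContains]
  simp only [hcs]
  rw [hs, he,
    PySem.List.sorted_eq_self_of_pairwise _ _ ((Rs_pairwise line.toList 1 false).imp le_of_lt),
    PySem.List.sorted_eq_self_of_pairwise _ _ ((Re_pairwise line.toList 1).imp le_of_lt),
    ← (RL_map_fst line.toList 1).1, ← (RL_map_snd line.toList 1).1, List.zip_map']
  simp

-- per-row triples, the common shape of both zemljevid computations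
def triples (vrstice : List String) (y0 : Int) : List (Int × Int × Int) :=
  (PySem.List.enumerate vrstice y0).flatMap
    (fun p => (pretvoriVrstico p.2).map (fun r => (r.1, r.2, p.1)))

-- raw accumulation of pretvori_zemljevid (before its sort)
theorem zemljevid_raw (vrstice : List String) :
    ∀ (acc : List (Int × Int × Int)) (y : Int),
      (vrstice.foldl
        (fun (st : List (Int × Int × Int) × Int) vrstica =>
          ((pretvoriVrstico vrstica).foldl (fun acc p => acc ++ [(p.1, p.2, st.2)]) st.1, st.2 + 1))
        (acc, y)).1 = acc ++ triples vrstice y := by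
  induction vrstice with
  | nil => intro acc y; simp [triples, PySem.List.enumerate]
  | cons v vs ih =>
    intro acc y
    rw [List.foldl_cons]
    have hinner : (pretvoriVrstico v).foldl (fun acc p => acc ++ [(p.1, p.2, y)]) acc
        = acc ++ (pretvoriVrstico v).map (fun r => (r.1, r.2, y)) :=
      PySem.List.foldl_append_singleton_eq_map _ _ _
    simp only [hinner]
    rw [ih]
    simp [triples, PySem.List.enumerate_cons, List.flatMap_cons, List.append_assoc]

theorem pretvoriVrstico_fst_pairwise (line : String) :
    (pretvoriVrstico line).Pairwise (fun a b => a.1 < b.1) := by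
  rw [pretvoriVrstico_RL]
  have h := Rs_pairwise line.toList 1 false
  rw [← (RL_map_fst line.toList 1).1] at h
  exact (List.pairwise_map.mp h)

theorem triples_row (vrstice : List String) (y0 : Int) :
    ∀ t ∈ triples vrstice y0, y0 ≤ t.2.2 := by
  induction vrstice generalizing y0 with
  | nil => simp [triples, PySem.List.enumerate]
  | cons v vs ih =>
    intro t ht
    rw [triples, PySem.List.enumerate_cons, List.flatMap_cons, List.mem_append] at ht
    rcases ht with h | h
    · rcases List.mem_map.mp h with ⟨r, _, rfl⟩; simp
    · have := ih (y0 + 1) t h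
      omega

-- the triples strictly increase in the key (row, start column)
theorem triples_pairwise (vrstice : List String) (y0 : Int) :
    (triples vrstice y0).Pairwise
      (fun a b => a.2.2 < b.2.2 ∨ (¬ b.2.2 < a.2.2 ∧ a.1 < b.1)) := by
  induction vrstice generalizing y0 with
  | nil => simp [triples, PySem.List.enumerate]
  | cons v vs ih =>
    rw [triples, PySem.List.enumerate_cons, List.flatMap_cons, List.pairwise_append]
    refine ⟨?_, ih (y0 + 1), ?_⟩
    · rw [List.pairwise_map]
      refine (pretvoriVrstico_fst_pairwise v).imp_of_mem ?_
      intro a b _ _ hlt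
      exact Or.inr ⟨lt_irrefl y0, hlt⟩
    · intro a ha b hb
      rcases List.mem_map.mp ha with ⟨r, _, rfl⟩
      have h2 := triples_row vs (y0 + 1) b hb
      left; simpa using by omega

-- (proved here, not in PySem: identity of sorted2 on a strictly (k1,k2)-increasing list)
theorem foldl_insertBy_append {α : Type} (before : α → α → Bool) :
    ∀ (L acc : List α), (∀ x ∈ L, ∀ y ∈ acc, before x y = false) →
      L.Pairwise (fun a b => before b a = false) →
      L.foldl (fun acc x => PySem.List.insertBy before x acc) acc = acc ++ L := by
  intro L
  induction L with
  | nil => intro acc _ _; simp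
  | cons x L ih =>
    intro acc hcross hpw
    rw [List.foldl_cons,
      PySem.List.insertBy_of_forall_not_before before x acc (hcross x (by simp)),
      ih (acc ++ [x]) ?_ hpw.of_cons]
    · simp
    · intro z hz w hw
      rcases List.mem_append.mp hw with h | h
      · exact hcross z (by simp [hz]) w h
      · rw [List.mem_singleton] at h
        subst h
        exact (List.pairwise_cons.mp hpw).1 z hz

theorem sorted2_eq_self {α : Type} (xs : List α) (k1 k2 : α → Int)
    (h : xs.Pairwise (fun a b => k1 a < k1 b ∨ (¬ k1 b < k1 a ∧ k2 a < k2 b))) :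
    PySem.List.sorted2 xs k1 k2 = xs := by
  show xs.foldl _ [] = xs
  rw [foldl_insertBy_append _ xs [] (by simp) ?_]
  · simp
  · refine h.imp ?_
    intro a b hab
    rcases hab with h1 | ⟨h1, h2⟩
    · simp only [Bool.false_eq_true, if_false, Bool.or_eq_false_iff, decide_eq_false_iff_not,
        not_lt, Bool.and_eq_false_iff, Bool.not_eq_false', decide_eq_true_eq]
      refine ⟨by omega, Or.inl (by omega)⟩
    · simp only [Bool.false_eq_true, if_false, Bool.or_eq_false_iff, decide_eq_false_iff_not,
        not_lt, Bool.and_eq_false_iff, Bool.not_eq_false', decide_eq_true_eq]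
      refine ⟨by omega, Or.inr (by omega)⟩

theorem pretvoriZemljevid_eq (vrstice : List String) :
    pretvoriZemljevid vrstice = triples vrstice 1 := by
  unfold pretvoriZemljevid
  have hraw := zemljevid_raw vrstice [] 1
  simp only [hraw, List.nil_append]
  exact sorted2_eq_self _ _ _ (triples_pairwise vrstice 1)

-- membership of a triple in the triples of a map, by its row
theorem mem_triples (vs : List String) : ∀ (y0 a b y : Int),
    (a, b, y) ∈ triples vs y0 ↔
      ∃ (k : Nat), ∃ _ : k < vs.length, y = y0 + k ∧ (a, b) ∈ pretvoriVrstico vs[k] := by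
  induction vs with
  | nil => intro y0 a b y; simp [triples, PySem.List.enumerate]
  | cons v vsr ih =>
    intro y0 a b y
    rw [triples, PySem.List.enumerate_cons, List.flatMap_cons, List.mem_append, ← triples, ih]
    constructor
    · rintro (h | ⟨k, hk, hy, hm⟩)
      · rcases List.mem_map.mp h with ⟨⟨r1, r2⟩, hr, heq⟩
        simp only [Prod.mk.injEq] at heq
        obtain ⟨rfl, rfl, rfl⟩ := heq
        exact ⟨0, by simp, by simp, by simpa using hr⟩
      · exact ⟨k + 1, by simp only [List.length_cons]; omega,
          by push_cast at hy ⊢; omega, by simpa using hm⟩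
    · rintro ⟨k, hk, hy, hm⟩
      cases k with
      | zero =>
        left
        refine List.mem_map.mpr ⟨(a, b), by simpa using hm, ?_⟩
        simp at hy
        simp [hy]
      | succ k =>
        right
        simp only [List.length_cons] at hk
        exact ⟨k, by omega, by push_cast at hy ⊢; omega, by simpa using hm⟩

-- ===== VERDICT (by name: the statement is the Claim_ definition above) =====
theorem izboljsave_spec : Claim_equal_izboljsave := by
  intro prej potem _
  show izboljsave prej potem = izboljsave_alt prej potem
  unfold izboljsave izboljsave_alt
  simp only [pretvoriZemljevid_eq]
  -- A's diff loop is a filter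
  have hstep : (fun (acc : List (Int × Int × Int)) nova_ovira =>
        if nova_ovira ∈ triples prej 1 then acc else acc ++ [nova_ovira])
      = (fun acc t =>
        if (!(decide (t ∈ triples prej 1))) = true then acc ++ [t] else acc) := by
    funext acc t
    by_cases h : t ∈ triples prej 1 <;> simp [h]
  rw [hstep]
  have hfold := PySem.List.foldl_append_if
    (fun t => !(decide (t ∈ triples prej 1))) id (triples potem 1) []
  simp only [id_eq, List.map_id, List.nil_append] at hfold
  rw [hfold]
  rw [sorted2_eq_self _ _ _ ((triples_pairwise potem 1).filter _)]
  -- push A's filter into the per-row structure and match B's per-row diff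
  have ht : triples potem 1 = (PySem.List.enumerate potem 1).flatMap
      (fun p => (pretvoriVrstico p.2).map (fun r => (r.1, r.2, p.1))) := rfl
  rw [ht, List.filter_flatMap]
  refine List.flatMap_congr ?_
  intro p hp
  rcases (PySem.List.mem_enumerate_iff potem 1 p).mp hp with ⟨k, hk, rfl⟩
  rw [List.filter_map, bRuns_eq]
  refine congrArg _ (List.filter_congr ?_)
  intro r hr
  obtain ⟨r1, r2⟩ := r
  have hiff : ((r1, r2, (1 : Int) + k) ∈ triples prej 1) ↔ (r1, r2) ∈ bStare prej ((1 : Int) + k) := by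
    rw [mem_triples, bStare]
    by_cases hle : (1 : Int) + k ≤ (prej.length : Int)
    · rw [if_pos hle]
      have hklt : k < prej.length := by omega
      have hidx : ((1 : Int) + k - 1) = ((k : Nat) : Int) := by omega
      rw [hidx, PySem.List.pyGet?_ofNat prej k hklt]
      simp only [Option.getD_some]
      rw [bRuns_eq]
      constructor
      · rintro ⟨k', hk', heq, hm⟩
        have : k' = k := by omega
        subst this
        exact hm
      · intro hm
        exact ⟨k, hklt, by omega, hm⟩
    · rw [if_neg hle]
      simp only [List.not_mem_nil, iff_false]
      rintro ⟨k', hk', heq, _⟩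
      omega
  simp [Function.comp, hiff]
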